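-- pv_equiv track=rewrite | github.com/plutaniano/advent-of-code-2024 | aoc2024/day04.py | solve
-- ===== SOURCE A (Python) =====
-- from typing import Generator
--
-- INCREMENTS = (
--     (-1, -1),
--     (-1, 0),
--     (-1, 1),
--     (0, -1),
--     (0, 1),
--     (1, -1),
--     (1, 0),
--     (1, 1),
-- )
--
-- def search_xmas_on(puzzle: list[str], i: int, j: int) -> int:
--     total = 0
--     for i_step, j_step in INCREMENTS:
--         for index, letter in enumerate("MAS", start=1):
--             i_offset = i + (i_step * index)
--             j_offset = j + (j_step * index)
--             try:
--                 assert i_offset >= 0 and j_offset >= 0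
--                 assert letter == puzzle[i_offset][j_offset]
--             except (IndexError, AssertionError):
--                 break
--         else:
--             total += 1
--
--     return total
--
-- def search_x_mas_on(puzzle: list[str], i: int, j: int) -> int:
--     try:
--         assert i - 1 >= 0 and j - 1 >= 0
--         letters = "".join(
--             [
--                 puzzle[i - 1][j - 1],
--                 puzzle[i - 1][j + 1],
--                 puzzle[i + 1][j - 1],
--                 puzzle[i + 1][j + 1],
--             ]
--         )
--         return letters in ["MSMS", "MMSS", "SSMM", "SMSM"]
--     except (IndexError, AssertionError):
--         return 0
--
-- def solve(puzzle_input: str) -> Generator[int, None, None]: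
--     puzzle = puzzle_input.splitlines()
--
--     total1 = 0
--     total2 = 0
--     for i, row in enumerate(puzzle_input.splitlines()):
--         for j, letter in enumerate(row):
--             if letter == "X":
--                 total1 += search_xmas_on(puzzle, i, j)
--             elif letter == "A":
--                 total2 += search_x_mas_on(puzzle, i, j)
--
--     yield total1
--     yield total2
-- ===== SOURCE B (Python) =====
-- XT = ("X", "M", "A", "S")
-- ST = ("S", "A", "M", "X")
-- MS = (("M", "S"), ("S", "M"))
--
-- def cell(row, j):
--     return row[j] if 0 <= j < len(row) else None
--
-- def count_row(row):
--     n = 0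
--     for k in range(len(row)):
--         if (cell(row, k), cell(row, k + 1), cell(row, k + 2), cell(row, k + 3)) in (XT, ST):
--             n += 1
--     return n
--
-- def window4(a, b, c, d):
--     n = 0
--     for j in range(len(a)):
--         for dj in (-1, 0, 1):
--             if (cell(a, j), cell(b, j + dj), cell(c, j + 2 * dj), cell(d, j + 3 * dj)) in (XT, ST):
--                 n += 1
--     return n
--
-- def window3(a, b, c):
--     n = 0
--     for j in range(len(b)):
--         if b[j] == "A" and (cell(a, j - 1), cell(c, j + 1)) in MS and (cell(a, j + 1), cell(c, j - 1)) in MS: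
--             n += 1
--     return n
--
-- def solve(puzzle_input):
--     rows = puzzle_input.splitlines()
--     h = len(rows)
--     total1 = 0
--     total2 = 0
--     for i in range(h):
--         total1 += count_row(rows[i])
--         if i + 3 < h:
--             total1 += window4(rows[i], rows[i + 1], rows[i + 2], rows[i + 3])
--         if i + 2 < h:
--             total2 += window3(rows[i], rows[i + 1], rows[i + 2])
--     yield total1
--     yield total2
-- ===== Notes on version B (the rewrite author's own statement) =====
-- stated objective: alternative
-- what changed: A probes eight directions outward from every X cell (and four corners from every A cell) with exception-driven bounds checks; B scans the grid by windows instead: per-row 1x4 windows counting both word orientations, 4-row windows with three diagonal slopes anchored at the window's top row, and 3-row windows for part two, all with explicit bounds.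
import Mathlib
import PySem

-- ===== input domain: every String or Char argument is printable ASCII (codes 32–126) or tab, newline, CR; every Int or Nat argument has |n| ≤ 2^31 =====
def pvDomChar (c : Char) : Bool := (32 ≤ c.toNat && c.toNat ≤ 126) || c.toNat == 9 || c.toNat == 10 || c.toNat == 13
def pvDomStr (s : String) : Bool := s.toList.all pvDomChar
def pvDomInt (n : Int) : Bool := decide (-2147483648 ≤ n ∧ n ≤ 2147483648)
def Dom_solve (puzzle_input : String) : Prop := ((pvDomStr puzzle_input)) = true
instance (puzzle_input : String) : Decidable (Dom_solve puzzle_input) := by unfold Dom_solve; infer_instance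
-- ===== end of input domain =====

-- B rewrites the per-'X' eight-direction probing as window scanning (per-row 1×4 windows
-- and 4-row / 3-row row-windows with three slopes), anchored at window tops: an
-- alternative decomposition of the same counts, no exception-driven bounds checks.

-- ===== PORT A =====
def INCREMENTS : List (Int × Int) :=
  [(-1, -1), (-1, 0), (-1, 1), (0, -1), (0, 1), (1, -1), (1, 0), (1, 1)]

-- inner 'for index, letter in enumerate("MAS", 1): … break / else' loop of search_xmas_on:
-- returns true when the loop runs to completion (the 'else' branch fires)
def masCheck (puzzle : List String) (i j i_step j_step : Int) : List (Int × Char) → Bool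
  | [] => true
  | (index, letter) :: rest =>
    let i_offset := i + i_step * index
    let j_offset := j + j_step * index
    if 0 ≤ i_offset ∧ 0 ≤ j_offset then
      match PySem.List.pyGet? puzzle i_offset with
      | none => false
      | some row =>
        match PySem.Str.pyGet? row j_offset with
        | none => false
        | some ch => if letter = ch then masCheck puzzle i j i_step j_step rest else false
    else false

def search_xmas_on (puzzle : List String) (i j : Int) : Int :=
  INCREMENTS.foldl
    (fun total p =>
      if masCheck puzzle i j p.1 p.2 (PySem.List.enumerate "MAS".toList 1) then total + 1 else total)
    0

def search_x_mas_on (puzzle : List String) (i j : Int) : Int :=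
  if 0 ≤ i - 1 ∧ 0 ≤ j - 1 then
    match (PySem.List.pyGet? puzzle (i - 1)).bind (fun r => PySem.Str.pyGet? r (j - 1)),
          (PySem.List.pyGet? puzzle (i - 1)).bind (fun r => PySem.Str.pyGet? r (j + 1)),
          (PySem.List.pyGet? puzzle (i + 1)).bind (fun r => PySem.Str.pyGet? r (j - 1)),
          (PySem.List.pyGet? puzzle (i + 1)).bind (fun r => PySem.Str.pyGet? r (j + 1)) with
    | some c1, some c2, some c3, some c4 =>
      if [c1, c2, c3, c4] ∈ ["MSMS".toList, "MMSS".toList, "SSMM".toList, "SMSM".toList]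
      then 1 else 0
    | _, _, _, _ => 0
  else 0

def solve (puzzle_input : String) : List Int :=
  let puzzle := PySem.Str.splitlines puzzle_input
  let t :=
    (PySem.List.enumerate (PySem.Str.splitlines puzzle_input) 0).foldl
      (fun (t : Int × Int) p =>
        (PySem.List.enumerate p.2.toList 0).foldl
          (fun (t : Int × Int) q =>
            if q.2 = 'X' then (t.1 + search_xmas_on puzzle p.1 q.1, t.2)
            else if q.2 = 'A' then (t.1, t.2 + search_x_mas_on puzzle p.1 q.1)
            else t)
          t)
      (0, 0)
  [t.1, t.2]

-- ===== PORT B =====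
def XTW : Option Char × Option Char × Option Char × Option Char :=
  (some 'X', some 'M', some 'A', some 'S')
def STW : Option Char × Option Char × Option Char × Option Char :=
  (some 'S', some 'A', some 'M', some 'X')
def MSW : List (Option Char × Option Char) := [(some 'M', some 'S'), (some 'S', some 'M')]

def cellB (row : String) (j : Int) : Option Char :=
  if 0 ≤ j ∧ j < PySem.Str.len row then PySem.Str.pyGet? row j else none

def count_row_alt (row : String) : Int :=
  (PySem.List.pyRange 0 (PySem.Str.len row) 1).foldl
    (fun n k =>
      if (cellB row k, cellB row (k + 1), cellB row (k + 2), cellB row (k + 3)) ∈ [XTW, STW]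
      then n + 1 else n)
    0

def window4_alt (a b c d : String) : Int :=
  (PySem.List.pyRange 0 (PySem.Str.len a) 1).foldl
    (fun n j =>
      ([-1, 0, 1] : List Int).foldl
        (fun n dj =>
          if (cellB a j, cellB b (j + dj), cellB c (j + 2 * dj), cellB d (j + 3 * dj)) ∈ [XTW, STW]
          then n + 1 else n)
        n)
    0

def window3_alt (a b c : String) : Int :=
  (PySem.List.pyRange 0 (PySem.Str.len b) 1).foldl
    (fun n j =>
      if PySem.Str.pyGet? b j = some 'A' ∧ (cellB a (j - 1), cellB c (j + 1)) ∈ MSW ∧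
          (cellB a (j + 1), cellB c (j - 1)) ∈ MSW
      then n + 1 else n)
    0

def solve_alt (puzzle_input : String) : List Int :=
  let rows := PySem.Str.splitlines puzzle_input
  let h : Int := rows.length
  let t :=
    (PySem.List.pyRange 0 h 1).foldl
      (fun (t : Int × Int) i =>
        let t1 := t.1 + count_row_alt (PySem.List.pyGetD rows i "")
        let t1 := if i + 3 < h then
            t1 + window4_alt (PySem.List.pyGetD rows i "") (PySem.List.pyGetD rows (i + 1) "")
              (PySem.List.pyGetD rows (i + 2) "") (PySem.List.pyGetD rows (i + 3) "")
          else t1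
        let t2 := if i + 2 < h then
            t.2 + window3_alt (PySem.List.pyGetD rows i "") (PySem.List.pyGetD rows (i + 1) "")
              (PySem.List.pyGetD rows (i + 2) "")
          else t.2
        (t1, t2))
      (0, 0)
  [t.1, t.2]

-- ===== PRECONDITION & SPEC =====
def Spec_solve (puzzle_input : String) (out : List Int) : Prop := out = solve_alt puzzle_input
instance (puzzle_input : String) (out : List Int) : Decidable (Spec_solve puzzle_input out) := by unfold Spec_solve; infer_instance

-- ===== CLAIM (what is proved, stated in full; the proofs are below) =====
def Claim_equal_solve : Prop := ∀ (puzzle_input : String), Dom_solve puzzle_input → Spec_solve puzzle_input (solve puzzle_input)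

-- ===== LEMMAS AND PROOFS =====

-- the grid cell (i, j), when both indices are non-negative and in range; none otherwise
def cellAt (g : List String) (i j : Int) : Option Char :=
  if 0 ≤ i ∧ 0 ≤ j then (PySem.List.pyGet? g i).bind (fun r => PySem.Str.pyGet? r j) else none

def rowZ (g : List String) (u : Int) : List Char :=
  if 0 ≤ u then (g.getD u.toNat "").toList else []

def lenZ (g : List String) (u : Int) : ℕ := (rowZ g u).length

-- indicator: "XMAS" written from anchor (i, j) in direction (di, dj)
def xmas1 (g : List String) (i j di dj : Int) : Int :=
  if cellAt g i j = some 'X' ∧ cellAt g (i + di) (j + dj) = some 'M' ∧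
      cellAt g (i + 2 * di) (j + 2 * dj) = some 'A' ∧
      cellAt g (i + 3 * di) (j + 3 * dj) = some 'S'
  then 1 else 0

def msPair (a b : Option Char) : Bool :=
  (a == some 'M' && b == some 'S') || (a == some 'S' && b == some 'M')

-- indicator: X-MAS centred at (i, j)
def xInd (g : List String) (i j : Int) : Int :=
  if cellAt g i j = some 'A' ∧ msPair (cellAt g (i - 1) (j - 1)) (cellAt g (i + 1) (j + 1)) = true ∧
      msPair (cellAt g (i - 1) (j + 1)) (cellAt g (i + 1) (j - 1)) = true
  then 1 else 0

def dirSum (g : List String) (i j : Int) : Int :=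
  xmas1 g i j (-1) (-1) + xmas1 g i j (-1) 0 + xmas1 g i j (-1) 1 + xmas1 g i j 0 (-1) +
    xmas1 g i j 0 1 + xmas1 g i j 1 (-1) + xmas1 g i j 1 0 + xmas1 g i j 1 1

def maxLen (g : List String) : ℕ := g.foldr (fun r m => max r.toList.length m) 0

-- ---------- generic sum lemmas ----------

theorem list_range_map_sum (f : ℕ → Int) (n : ℕ) :
    ((List.range n).map f).sum = ∑ k ∈ Finset.range n, f k := by
  induction n with
  | zero => simp
  | succ n ih => simp [List.range_succ, Finset.sum_range_succ, ih]

theorem sum_shift_add (F : Int → Int) (n s : ℕ)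
    (h0 : ∀ z : Int, 0 ≤ z → z < (s : Int) → F z = 0)
    (h1 : ∀ z : Int, (n : Int) ≤ z → F z = 0) :
    (∑ k ∈ Finset.range n, F ((k : Int) + (s : Int))) = ∑ k ∈ Finset.range n, F (k : Int) := by
  -- LHS: sum of F over [s, n+s); kill the first s values of the RHS and the top s of LHS range
  have hs : (∑ k ∈ Finset.range s, F (k : Int)) = 0 :=
    Finset.sum_eq_zero fun k hk => h0 _ (by positivity) (by exact_mod_cast Finset.mem_range.mp hk)
  have hLHS : (∑ k ∈ Finset.range n, F ((k : Int) + (s : Int))) =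
      ∑ k ∈ Finset.range (n + s), F (k : Int) := by
    have h := Finset.sum_range_add (fun k => F (k : Int)) s n
    rw [Nat.add_comm s n] at h
    rw [h, hs, zero_add]
    refine Finset.sum_congr rfl fun k _ => ?_
    congr 1
    omega
  have hRHS : (∑ k ∈ Finset.range (n + s), F (k : Int)) = ∑ k ∈ Finset.range n, F (k : Int) := by
    have h := Finset.sum_range_add (fun k => F (k : Int)) n s
    rw [h]
    have : (∑ k ∈ Finset.range s, F ((n + k : ℕ) : Int)) = 0 :=
      Finset.sum_eq_zero fun k _ => h1 _ (by push_cast; omega)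
    rw [this, add_zero]
  rw [hLHS, hRHS]

theorem sum_shift_sub (F : Int → Int) (n s : ℕ)
    (hneg : ∀ z : Int, z < 0 → F z = 0)
    (h1 : ∀ z : Int, (n : Int) - (s : Int) ≤ z → F z = 0) :
    (∑ k ∈ Finset.range n, F ((k : Int) - (s : Int))) = ∑ k ∈ Finset.range n, F (k : Int) := by
  rcases Nat.lt_or_ge n s with hns | hsn
  · have e1 : (∑ k ∈ Finset.range n, F ((k : Int) - (s : Int))) = 0 :=
      Finset.sum_eq_zero fun k hk => hneg _ (by
        have := Finset.mem_range.mp hk; omega)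
    have e2 : (∑ k ∈ Finset.range n, F (k : Int)) = 0 :=
      Finset.sum_eq_zero fun k hk => h1 _ (by
        have := Finset.mem_range.mp hk; omega)
    rw [e1, e2]
  · obtain ⟨m, rfl⟩ : ∃ m, n = s + m := ⟨n - s, by omega⟩
    have hL := Finset.sum_range_add (fun k => F ((k : Int) - (s : Int))) s m
    have hR := Finset.sum_range_add (fun k => F (k : Int)) m s
    rw [Nat.add_comm m s] at hR
    rw [hL, hR]
    have e1 : (∑ k ∈ Finset.range s, F ((k : Int) - (s : Int))) = 0 :=
      Finset.sum_eq_zero fun k hk => hneg _ (by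
        have := Finset.mem_range.mp hk; omega)
    have e2 : (∑ k ∈ Finset.range s, F ((m + k : ℕ) : Int)) = 0 :=
      Finset.sum_eq_zero fun k _ => h1 _ (by push_cast; omega)
    rw [e1, e2, zero_add, add_zero]
    refine Finset.sum_congr rfl fun k _ => ?_
    congr 1
    omega


theorem sum_extend (F : Int → Int) (m W : ℕ) (h : m ≤ W)
    (hv : ∀ z : Int, (m : Int) ≤ z → F z = 0) :
    (∑ k ∈ Finset.range m, F (k : Int)) = ∑ k ∈ Finset.range W, F (k : Int) := by
  refine Finset.sum_subset ?_ fun k hk hk' => ?_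
  · intro x hx
    simp only [Finset.mem_range] at hx ⊢
    omega
  · refine hv _ ?_
    simp only [Finset.mem_range, not_lt] at hk'
    exact_mod_cast hk' 

-- ---------- fold-to-sum conversions ----------

theorem foldl_pyRange_add (n : ℕ) (F : Int → Int) (a : Int) :
    (PySem.List.pyRange 0 (n : Int) 1).foldl (fun acc k => acc + F k) a =
      a + ∑ k ∈ Finset.range n, F (k : Int) := by
  rw [PySem.List.foldl_add, PySem.List.pyRange_zero_nat, List.map_map, list_range_map_sum]
  rfl

theorem foldl_pyRange_pair (n : ℕ) (F G : Int → Int) (t : Int × Int) :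
    (PySem.List.pyRange 0 (n : Int) 1).foldl (fun t i => (t.1 + F i, t.2 + G i)) t =
      (t.1 + ∑ k ∈ Finset.range n, F (k : Int), t.2 + ∑ k ∈ Finset.range n, G (k : Int)) := by
  obtain ⟨a, b⟩ := t
  rw [PySem.List.foldl_prod_mk (f := fun acc i => acc + F i) (g := fun acc i => acc + G i),
    foldl_pyRange_add, foldl_pyRange_add]

theorem foldl_enum_pair {α : Type} (xs : List α) (d : α) (F G : Int → α → Int) (t : Int × Int) :
    (PySem.List.enumerate xs 0).foldl (fun t p => (t.1 + F p.1 p.2, t.2 + G p.1 p.2)) t =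
      (t.1 + ∑ k ∈ Finset.range xs.length, F (k : Int) (xs.getD k d),
        t.2 + ∑ k ∈ Finset.range xs.length, G (k : Int) (xs.getD k d)) := by
  obtain ⟨a, b⟩ := t
  rw [PySem.List.enumerate_eq_map_pyRange xs d, List.foldl_map,
    PySem.List.foldl_prod_mk (f := fun acc j => acc + F j (PySem.List.pyGetD xs j d))
      (g := fun acc j => acc + G j (PySem.List.pyGetD xs j d))]
  have hlen : PySem.List.len xs = ((xs.length : ℕ) : Int) := by simp [PySem.List.len]
  rw [hlen, foldl_pyRange_add, foldl_pyRange_add]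
  simp [PySem.List.pyGetD_natCast]

-- ---------- cellAt facts ----------

theorem cellAt_spec (g : List String) (i : ℕ) (hi : i < g.length) (j : Int) :
    cellAt g (i : Int) j =
      if 0 ≤ j then ((g.getD i "").toList)[j.toNat]? else none := by
  unfold cellAt
  by_cases hj : 0 ≤ j
  · rw [if_pos ⟨Int.natCast_nonneg i, hj⟩, if_pos hj, PySem.List.pyGet?_natCast,
      List.getElem?_eq_getElem (by omega), Option.bind_some]
    have : g[i] = g.getD i "" := by rw [List.getD_eq_getElem g "" hi]
    rw [this]
    simp only [PySem.Str.pyGet?_eq, PySem.Chars.pyGet?_eq_listPyGet?]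
    exact PySem.List.pyGet?_of_nonneg _ hj
  · rw [if_neg (by omega), if_neg hj]

theorem cellAt_none_row (g : List String) (i j : Int)
    (h : i < 0 ∨ (g.length : Int) ≤ i) : cellAt g i j = none := by
  unfold cellAt
  rcases h with h | h
  · rw [if_neg (by omega)]
  · by_cases hgd : 0 ≤ i ∧ 0 ≤ j
    · rw [if_pos hgd]
      have : PySem.List.pyGet? g i = none := by
        rw [PySem.List.pyGet?_eq_none_iff]
        unfold PySem.Raise.InRange
        omega
      rw [this]
      rfl
    · rw [if_neg hgd]

theorem cellAt_none_col (g : List String) (i j : Int)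
    (h : j < 0 ∨ ((lenZ g i : Int)) ≤ j) : cellAt g i j = none := by
  unfold cellAt
  rcases h with h | h
  · rw [if_neg (by omega)]
  · by_cases hgd : 0 ≤ i ∧ 0 ≤ j
    · rw [if_pos hgd]
      by_cases hi : i < (g.length : Int)
      · have hiN : i = ((i.toNat : ℕ) : Int) := by omega
        have hlt : i.toNat < g.length := by omega
        rw [hiN, PySem.List.pyGet?_natCast, List.getElem?_eq_getElem hlt, Option.bind_some]
        have hrow : g[i.toNat] = g.getD i.toNat "" := by rw [List.getD_eq_getElem g "" hlt]
        have hlen : lenZ g i = (g.getD i.toNat "").toList.length := by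
          unfold lenZ rowZ
          rw [if_pos hgd.1]
        rw [hrow]
        simp only [PySem.Str.pyGet?_eq, PySem.Chars.pyGet?_eq_listPyGet?]
        rw [PySem.List.pyGet?_eq_none_iff]
        unfold PySem.Raise.InRange
        rw [hlen] at h
        omega
      · have : PySem.List.pyGet? g i = none := by
          rw [PySem.List.pyGet?_eq_none_iff]
          unfold PySem.Raise.InRange
          omega
        rw [this, Option.bind_none]
    · rw [if_neg hgd]

theorem cellAt_char (g : List String) (i j : ℕ) (hi : i < g.length)
    (hj : j < (g.getD i "").toList.length) :
    cellAt g (i : Int) (j : Int) = some ((g.getD i "").toList.getD j ' ') := by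
  rw [cellAt_spec g i hi, if_pos (Int.natCast_nonneg j), Int.toNat_natCast,
    List.getElem?_eq_getElem hj, List.getD_eq_getElem _ ' ' hj]

theorem lenZ_nat (g : List String) (i : ℕ) : lenZ g (i : Int) = (g.getD i "").toList.length := by
  unfold lenZ rowZ
  rw [if_pos (Int.natCast_nonneg i), Int.toNat_natCast]

theorem mem_len_le_maxLen (g : List String) : ∀ r ∈ g, r.toList.length ≤ maxLen g := by
  induction g with
  | nil => intro r hr; simp at hr
  | cons x t ih =>
    intro r hr
    unfold maxLen
    simp only [List.foldr_cons]
    rcases List.mem_cons.mp hr with h | h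
    · subst h; omega
    · have := ih r h
      unfold maxLen at this
      omega

theorem lenZ_le_maxLen (g : List String) (u : Int) : lenZ g u ≤ maxLen g := by
  unfold lenZ rowZ
  by_cases hu : 0 ≤ u
  · rw [if_pos hu]
    by_cases hlt : u.toNat < g.length
    · rw [List.getD_eq_getElem g "" hlt]
      exact mem_len_le_maxLen g _ (List.getElem_mem hlt)
    · rw [List.getD_eq_default g "" (by omega)]
      simp
  · rw [if_neg hu]
    simp

-- ---------- vanishing lemmas ----------

theorem xmas1_zero_anchor_col (g : List String) (i j di dj : Int)
    (h : j < 0 ∨ ((lenZ g i : Int)) ≤ j) : xmas1 g i j di dj = 0 := by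
  unfold xmas1
  rw [if_neg]
  rintro ⟨h1, -⟩
  rw [cellAt_none_col g i j h] at h1
  cases h1

theorem xmas1_zero_anchor_row (g : List String) (i j di dj : Int)
    (h : i < 0 ∨ (g.length : Int) ≤ i) : xmas1 g i j di dj = 0 := by
  unfold xmas1
  rw [if_neg]
  rintro ⟨h1, -⟩
  rw [cellAt_none_row g i j h] at h1
  cases h1

theorem xmas1_zero_S_col (g : List String) (i j di dj : Int)
    (h : j + 3 * dj < 0 ∨ ((lenZ g (i + 3 * di) : Int)) ≤ j + 3 * dj) :
    xmas1 g i j di dj = 0 := by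
  unfold xmas1
  rw [if_neg]
  rintro ⟨-, -, -, h4⟩
  rw [cellAt_none_col g _ _ h] at h4
  cases h4

theorem xmas1_zero_S_row (g : List String) (i j di dj : Int)
    (h : i + 3 * di < 0 ∨ (g.length : Int) ≤ i + 3 * di) : xmas1 g i j di dj = 0 := by
  unfold xmas1
  rw [if_neg]
  rintro ⟨-, -, -, h4⟩
  rw [cellAt_none_row g _ _ h] at h4
  cases h4

theorem xInd_zero_anchor_col (g : List String) (i j : Int)
    (h : j < 0 ∨ ((lenZ g i : Int)) ≤ j) : xInd g i j = 0 := by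
  unfold xInd
  rw [if_neg]
  rintro ⟨h1, -⟩
  rw [cellAt_none_col g i j h] at h1
  cases h1

theorem xInd_zero_anchor_row (g : List String) (i j : Int)
    (h : i < 0 ∨ (g.length : Int) ≤ i) : xInd g i j = 0 := by
  unfold xInd
  rw [if_neg]
  rintro ⟨h1, -⟩
  rw [cellAt_none_row g i j h] at h1
  cases h1

theorem xInd_zero_up (g : List String) (i j : Int) (h : i - 1 < 0) : xInd g i j = 0 := by
  unfold xInd
  rw [if_neg]
  rintro ⟨-, h2, -⟩
  rw [cellAt_none_row g (i - 1) (j - 1) (Or.inl h)] at h2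
  simp [msPair] at h2

theorem xInd_zero_down (g : List String) (i j : Int)
    (h : (g.length : Int) ≤ i + 1) : xInd g i j = 0 := by
  unfold xInd
  rw [if_neg]
  rintro ⟨-, h2, -⟩
  rw [cellAt_none_row g (i + 1) (j + 1) (Or.inr h)] at h2
  simp [msPair] at h2

-- ---------- A-side characterizations ----------

theorem masCheck_cons (g : List String) (i j di dj idx : Int) (c : Char)
    (rest : List (Int × Char)) :
    masCheck g i j di dj ((idx, c) :: rest) =
      if cellAt g (i + di * idx) (j + dj * idx) = some c then masCheck g i j di dj rest
      else false := by
  simp only [masCheck]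
  unfold cellAt
  simp only [PySem.Str.pyGet?_eq, PySem.Chars.pyGet?_eq_listPyGet?]
  by_cases hg : 0 ≤ i + di * idx ∧ 0 ≤ j + dj * idx
  · simp only [if_pos hg]
    cases hrow : PySem.List.pyGet? g (i + di * idx) with
    | none => simp
    | some row =>
      simp only [Option.bind_some]
      split
      · rename_i heq
        simp [heq]
      · rename_i ch heq
        simp only [heq]
        by_cases hc : c = ch
        · subst hc
          simp
        · simp [hc, Ne.symm hc]
  · simp [hg]

theorem mas_enum : PySem.List.enumerate "MAS".toList 1 = [(1, 'M'), (2, 'A'), (3, 'S')] := by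
  have h : "MAS".toList = ['M', 'A', 'S'] := rfl
  rw [h]
  norm_num [PySem.List.enumerate_cons, PySem.List.enumerate_nil]

theorem masCheck3 (g : List String) (i j di dj : Int) :
    masCheck g i j di dj [(1, 'M'), (2, 'A'), (3, 'S')] = true ↔
      (cellAt g (i + di * 1) (j + dj * 1) = some 'M' ∧
        cellAt g (i + di * 2) (j + dj * 2) = some 'A' ∧
        cellAt g (i + di * 3) (j + dj * 3) = some 'S') := by
  rw [masCheck_cons, masCheck_cons, masCheck_cons]
  split_ifs with h1 h2 h3 <;> simp_all [masCheck]

theorem dir_term (g : List String) (i j di dj : Int) (hX : cellAt g i j = some 'X') :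
    (if masCheck g i j di dj (PySem.List.enumerate "MAS".toList 1) then (1 : Int) else 0) =
      xmas1 g i j di dj := by
  rw [mas_enum]
  unfold xmas1
  simp only [hX, true_and]
  have e1 : i + di * 1 = i + di := by ring
  have e2 : j + dj * 1 = j + dj := by ring
  have e3 : i + di * 2 = i + 2 * di := by ring
  have e4 : j + dj * 2 = j + 2 * dj := by ring
  have e5 : i + di * 3 = i + 3 * di := by ring
  have e6 : j + dj * 3 = j + 3 * dj := by ring
  have h3 := masCheck3 g i j di dj
  rw [e1, e2, e3, e4, e5, e6] at h3
  by_cases H : cellAt g (i + di) (j + dj) = some 'M' ∧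
      cellAt g (i + 2 * di) (j + 2 * dj) = some 'A' ∧
      cellAt g (i + 3 * di) (j + 3 * dj) = some 'S'
  · rw [if_pos (h3.mpr H), if_pos H]
  · rw [if_neg (fun hmc => H (h3.mp hmc)), if_neg H]

theorem ite_add_one (c : Prop) [Decidable c] (x : Int) :
    (if c then x + 1 else x) = x + (if c then 1 else 0) := by
  split_ifs <;> ring

theorem search_xmas_eq (g : List String) (i j : Int) (hX : cellAt g i j = some 'X') :
    search_xmas_on g i j = dirSum g i j := by
  unfold search_xmas_on INCREMENTS
  simp only [List.foldl_cons, List.foldl_nil, ite_add_one]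
  rw [dir_term g i j (-1) (-1) hX, dir_term g i j (-1) 0 hX, dir_term g i j (-1) 1 hX,
    dir_term g i j 0 (-1) hX, dir_term g i j 0 1 hX, dir_term g i j 1 (-1) hX,
    dir_term g i j 1 0 hX, dir_term g i j 1 1 hX]
  unfold dirSum
  ring

theorem cellAt_some_nonneg (g : List String) (i j : Int) (c : Char)
    (h : cellAt g i j = some c) : 0 ≤ i ∧ 0 ≤ j := by
  unfold cellAt at h
  by_cases hg : 0 ≤ i ∧ 0 ≤ j
  · exact hg
  · rw [if_neg hg] at h
    cases h

theorem xInd_zero_left (g : List String) (i j : Int) (h : j - 1 < 0) : xInd g i j = 0 := by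
  unfold xInd
  rw [if_neg]
  rintro ⟨-, h2, -⟩
  rw [cellAt_none_col g (i - 1) (j - 1) (Or.inl h)] at h2
  simp [msPair] at h2

theorem search_x_eq (g : List String) (i j : Int) (hA : cellAt g i j = some 'A') :
    search_x_mas_on g i j = xInd g i j := by
  have hnn := cellAt_some_nonneg g i j 'A' hA
  unfold search_x_mas_on
  by_cases hg : 0 ≤ i - 1 ∧ 0 ≤ j - 1
  · have h11 : (PySem.List.pyGet? g (i - 1)).bind (fun r => PySem.Str.pyGet? r (j - 1)) =
        cellAt g (i - 1) (j - 1) := by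
      unfold cellAt
      rw [if_pos ⟨hg.1, hg.2⟩]
    have h12 : (PySem.List.pyGet? g (i - 1)).bind (fun r => PySem.Str.pyGet? r (j + 1)) =
        cellAt g (i - 1) (j + 1) := by
      unfold cellAt
      rw [if_pos ⟨hg.1, by omega⟩]
    have h13 : (PySem.List.pyGet? g (i + 1)).bind (fun r => PySem.Str.pyGet? r (j - 1)) =
        cellAt g (i + 1) (j - 1) := by
      unfold cellAt
      rw [if_pos ⟨by omega, hg.2⟩]
    have h14 : (PySem.List.pyGet? g (i + 1)).bind (fun r => PySem.Str.pyGet? r (j + 1)) =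
        cellAt g (i + 1) (j + 1) := by
      unfold cellAt
      rw [if_pos ⟨by omega, by omega⟩]
    rw [if_pos hg, h11, h12, h13, h14]
    unfold xInd
    simp only [hA, true_and]
    rcases hc1 : cellAt g (i - 1) (j - 1) with _ | c1 <;>
      rcases hc2 : cellAt g (i - 1) (j + 1) with _ | c2 <;>
        rcases hc3 : cellAt g (i + 1) (j - 1) with _ | c3 <;>
          rcases hc4 : cellAt g (i + 1) (j + 1) with _ | c4 <;>
            simp [msPair]
    exact if_congr (by tauto) rfl rfl
  · rw [if_neg hg]
    rcases not_and_or.mp hg with h | h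
    · exact (xInd_zero_up g i j (by omega)).symm
    · exact (xInd_zero_left g i j (by omega)).symm

theorem xmas1_zero_not_X (g : List String) (i j di dj : Int)
    (h : cellAt g i j ≠ some 'X') : xmas1 g i j di dj = 0 := by
  unfold xmas1
  rw [if_neg]
  rintro ⟨h1, -⟩
  exact h h1

theorem dirSum_zero_not_X (g : List String) (i j : Int) (h : cellAt g i j ≠ some 'X') :
    dirSum g i j = 0 := by
  unfold dirSum
  rw [xmas1_zero_not_X g i j (-1) (-1) h, xmas1_zero_not_X g i j (-1) 0 h,
    xmas1_zero_not_X g i j (-1) 1 h, xmas1_zero_not_X g i j 0 (-1) h,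
    xmas1_zero_not_X g i j 0 1 h, xmas1_zero_not_X g i j 1 (-1) h,
    xmas1_zero_not_X g i j 1 0 h, xmas1_zero_not_X g i j 1 1 h]
  norm_num

theorem xInd_zero_not_A (g : List String) (i j : Int) (h : cellAt g i j ≠ some 'A') :
    xInd g i j = 0 := by
  unfold xInd
  rw [if_neg]
  rintro ⟨h1, -⟩
  exact h h1

-- per-cell terms of A's main loop
theorem cellTerm1 (g : List String) (i j : ℕ) (hi : i < g.length)
    (hj : j < (g.getD i "").toList.length) :
    (if (g.getD i "").toList.getD j ' ' = 'X' then search_xmas_on g (i : Int) (j : Int) else 0) =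
      dirSum g (i : Int) (j : Int) := by
  have hc := cellAt_char g i j hi hj
  by_cases hX : (g.getD i "").toList.getD j ' ' = 'X'
  · rw [if_pos hX]
    rw [hX] at hc
    exact search_xmas_eq g _ _ hc
  · rw [if_neg hX]
    refine (dirSum_zero_not_X g _ _ ?_).symm
    rw [hc]
    simp only [ne_eq, Option.some.injEq]
    exact hX

theorem cellTerm2 (g : List String) (i j : ℕ) (hi : i < g.length)
    (hj : j < (g.getD i "").toList.length) :
    (if (g.getD i "").toList.getD j ' ' = 'X' then 0
     else if (g.getD i "").toList.getD j ' ' = 'A' then search_x_mas_on g (i : Int) (j : Int)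
     else 0) = xInd g (i : Int) (j : Int) := by
  have hc := cellAt_char g i j hi hj
  by_cases hX : (g.getD i "").toList.getD j ' ' = 'X'
  · rw [if_pos hX]
    refine (xInd_zero_not_A g _ _ ?_).symm
    rw [hc, hX]
    simp only [ne_eq, Option.some.injEq]
    decide
  · rw [if_neg hX]
    by_cases hA : (g.getD i "").toList.getD j ' ' = 'A'
    · rw [if_pos hA]
      rw [hA] at hc
      exact search_x_eq g _ _ hc
    · rw [if_neg hA]
      refine (xInd_zero_not_A g _ _ ?_).symm
      rw [hc]
      simp only [ne_eq, Option.some.injEq]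
      exact hA

set_option maxHeartbeats 1000000 in
theorem solve_eq_sums (s : String) :
    solve s =
      [∑ i ∈ Finset.range (PySem.Str.splitlines s).length,
          ∑ j ∈ Finset.range (lenZ (PySem.Str.splitlines s) (i : Int)),
            dirSum (PySem.Str.splitlines s) (i : Int) (j : Int),
        ∑ i ∈ Finset.range (PySem.Str.splitlines s).length,
          ∑ j ∈ Finset.range (lenZ (PySem.Str.splitlines s) (i : Int)),
            xInd (PySem.Str.splitlines s) (i : Int) (j : Int)] := by
  simp only [solve]
  have hB : ∀ p : Int × String,
      (fun (t : Int × Int) (q : Int × Char) =>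
        if q.2 = 'X' then (t.1 + search_xmas_on (PySem.Str.splitlines s) p.1 q.1, t.2)
        else if q.2 = 'A' then (t.1, t.2 + search_x_mas_on (PySem.Str.splitlines s) p.1 q.1)
        else t) =
      fun t q =>
        (t.1 + (if q.2 = 'X' then search_xmas_on (PySem.Str.splitlines s) p.1 q.1 else 0),
          t.2 + (if q.2 = 'X' then 0
            else if q.2 = 'A' then search_x_mas_on (PySem.Str.splitlines s) p.1 q.1 else 0)) := by
    intro p
    funext t q
    by_cases h1 : q.2 = 'X'
    · simp [h1]
    · by_cases h2 : q.2 = 'A' <;> simp [h1, h2]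
  have houter : (fun (t : Int × Int) (p : Int × String) =>
      (PySem.List.enumerate p.2.toList 0).foldl
        (fun (t : Int × Int) (q : Int × Char) =>
          if q.2 = 'X' then (t.1 + search_xmas_on (PySem.Str.splitlines s) p.1 q.1, t.2)
          else if q.2 = 'A' then (t.1, t.2 + search_x_mas_on (PySem.Str.splitlines s) p.1 q.1)
          else t) t) =
      fun t p =>
        (t.1 + (fun (iz : Int) (row : String) => ∑ k ∈ Finset.range row.toList.length,
            (if row.toList.getD k ' ' = 'X'
              then search_xmas_on (PySem.Str.splitlines s) iz (k : Int) else 0)) p.1 p.2,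
          t.2 + (fun (iz : Int) (row : String) => ∑ k ∈ Finset.range row.toList.length,
            (if row.toList.getD k ' ' = 'X' then 0
              else if row.toList.getD k ' ' = 'A'
                then search_x_mas_on (PySem.Str.splitlines s) iz (k : Int) else 0)) p.1 p.2) := by
    funext t p
    rw [hB p, foldl_enum_pair p.2.toList ' '
      (fun k c => if c = 'X' then search_xmas_on (PySem.Str.splitlines s) p.1 k else 0)
      (fun k c => if c = 'X' then 0
        else if c = 'A' then search_x_mas_on (PySem.Str.splitlines s) p.1 k else 0) t]
  rw [houter, foldl_enum_pair (PySem.Str.splitlines s) ""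
    (fun iz row => ∑ k ∈ Finset.range row.toList.length,
      (if row.toList.getD k ' ' = 'X'
        then search_xmas_on (PySem.Str.splitlines s) iz (k : Int) else 0))
    (fun iz row => ∑ k ∈ Finset.range row.toList.length,
      (if row.toList.getD k ' ' = 'X' then 0
        else if row.toList.getD k ' ' = 'A'
          then search_x_mas_on (PySem.Str.splitlines s) iz (k : Int) else 0)) (0, 0)]
  simp only [zero_add, List.cons.injEq, and_true]
  constructor
  · refine Finset.sum_congr rfl fun i hi => ?_
    have hi' := Finset.mem_range.mp hi
    rw [lenZ_nat]
    refine Finset.sum_congr rfl fun j hj => ?_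
    exact cellTerm1 _ i j hi' (Finset.mem_range.mp hj)
  · refine Finset.sum_congr rfl fun i hi => ?_
    have hi' := Finset.mem_range.mp hi
    rw [lenZ_nat]
    refine Finset.sum_congr rfl fun j hj => ?_
    exact cellTerm2 _ i j hi' (Finset.mem_range.mp hj)

-- ---------- B-side characterizations ----------

theorem cellB_eq (g : List String) (i : ℕ) (hi : i < g.length) (j : Int) :
    cellB (g.getD i "") j = cellAt g (i : Int) j := by
  rw [cellAt_spec g i hi]
  unfold cellB
  rw [PySem.Str.len_eq]
  by_cases hj : 0 ≤ j
  · rw [if_pos hj]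
    by_cases hlt : j < ((g.getD i "").toList.length : Int)
    · rw [if_pos ⟨hj, hlt⟩]
      simp only [PySem.Str.pyGet?_eq, PySem.Chars.pyGet?_eq_listPyGet?]
      exact PySem.List.pyGet?_of_nonneg _ hj
    · rw [if_neg (fun h => hlt h.2), List.getElem?_eq_none (by omega)]
  · rw [if_neg (fun h => hj h.1), if_neg hj]

theorem tuple4_XT (a b c d : Option Char) :
    ((a, b, c, d) = XTW) ↔ (a = some 'X' ∧ b = some 'M' ∧ c = some 'A' ∧ d = some 'S') := by
  simp [XTW, Prod.ext_iff]

theorem tuple4_ST (a b c d : Option Char) :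
    ((a, b, c, d) = STW) ↔ (a = some 'S' ∧ b = some 'A' ∧ c = some 'M' ∧ d = some 'X') := by
  simp [STW, Prod.ext_iff]

theorem term_xt (g : List String) (i : ℕ) (hi : i < g.length) (k : Int) :
    (if (cellB (g.getD i "") k, cellB (g.getD i "") (k + 1), cellB (g.getD i "") (k + 2),
        cellB (g.getD i "") (k + 3)) = XTW then (1 : Int) else 0) =
      xmas1 g (i : Int) k 0 1 := by
  unfold xmas1
  simp only [cellB_eq g i hi, tuple4_XT]
  norm_num

theorem term_st (g : List String) (i : ℕ) (hi : i < g.length) (k : Int) :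
    (if (cellB (g.getD i "") k, cellB (g.getD i "") (k + 1), cellB (g.getD i "") (k + 2),
        cellB (g.getD i "") (k + 3)) = STW then (1 : Int) else 0) =
      xmas1 g (i : Int) (k + 3) 0 (-1) := by
  unfold xmas1
  simp only [cellB_eq g i hi, tuple4_ST]
  refine if_congr ?_ rfl rfl
  ring_nf
  tauto

theorem count_row_eq (g : List String) (i : ℕ) (hi : i < g.length) :
    count_row_alt (g.getD i "") =
      ∑ k ∈ Finset.range (lenZ g (i : Int)),
        (xmas1 g (i : Int) (k : Int) 0 1 + xmas1 g (i : Int) ((k : Int) + 3) 0 (-1)) := by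
  unfold count_row_alt
  rw [PySem.Str.len_eq]
  have hbody : (fun (n k : Int) =>
      if (cellB (g.getD i "") k, cellB (g.getD i "") (k + 1), cellB (g.getD i "") (k + 2),
          cellB (g.getD i "") (k + 3)) ∈ [XTW, STW] then n + 1 else n) =
      fun n k => n +
        ((if (cellB (g.getD i "") k, cellB (g.getD i "") (k + 1), cellB (g.getD i "") (k + 2),
            cellB (g.getD i "") (k + 3)) = XTW then 1 else 0) +
          (if (cellB (g.getD i "") k, cellB (g.getD i "") (k + 1), cellB (g.getD i "") (k + 2),
            cellB (g.getD i "") (k + 3)) = STW then 1 else 0)) := by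
    funext n k
    by_cases h1 : (cellB (g.getD i "") k, cellB (g.getD i "") (k + 1), cellB (g.getD i "") (k + 2),
        cellB (g.getD i "") (k + 3)) = XTW
    · have h2 : (cellB (g.getD i "") k, cellB (g.getD i "") (k + 1), cellB (g.getD i "") (k + 2),
          cellB (g.getD i "") (k + 3)) ≠ STW := by
        rw [h1]
        decide
      rw [if_pos (h1 ▸ List.mem_cons_self), if_pos h1, if_neg h2]
      ring
    · by_cases h2 : (cellB (g.getD i "") k, cellB (g.getD i "") (k + 1),
          cellB (g.getD i "") (k + 2), cellB (g.getD i "") (k + 3)) = STW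
      · rw [if_pos (List.mem_cons_of_mem _ (h2 ▸ List.mem_cons_self)), if_neg h1, if_pos h2]
        ring
      · rw [if_neg, if_neg h1, if_neg h2]
        · ring
        · intro hm
          rcases List.mem_cons.mp hm with e | hm2
          · exact h1 e
          rcases List.mem_cons.mp hm2 with e | h0
          · exact h2 e
          · cases h0
  rw [hbody, foldl_pyRange_add _ _ 0, zero_add, lenZ_nat]
  refine Finset.sum_congr rfl fun k _ => ?_
  rw [term_xt g i hi, term_st g i hi]

theorem ite_mem_two (t : Option Char × Option Char × Option Char × Option Char) (n : Int) :
    (if t ∈ [XTW, STW] then n + 1 else n) =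
      n + ((if t = XTW then 1 else 0) + (if t = STW then 1 else 0)) := by
  by_cases h1 : t = XTW
  · have h2 : t ≠ STW := by
      rw [h1]
      decide
    rw [if_pos (h1 ▸ List.mem_cons_self), if_pos h1, if_neg h2]
    ring
  · by_cases h2 : t = STW
    · rw [if_pos (List.mem_cons_of_mem _ (h2 ▸ List.mem_cons_self)), if_neg h1, if_pos h2]
      ring
    · rw [if_neg, if_neg h1, if_neg h2]
      · ring
      · intro hm
        rcases List.mem_cons.mp hm with e | hm2
        · exact h1 e
        rcases List.mem_cons.mp hm2 with e | h0
        · exact h2 e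
        · cases h0

theorem term_w4_xt (g : List String) (i : ℕ) (hi : i + 3 < g.length) (j dj : Int) :
    (if (cellB (g.getD i "") j, cellB (g.getD (i + 1) "") (j + dj),
        cellB (g.getD (i + 2) "") (j + 2 * dj), cellB (g.getD (i + 3) "") (j + 3 * dj)) = XTW
      then (1 : Int) else 0) = xmas1 g (i : Int) j 1 dj := by
  unfold xmas1
  rw [cellB_eq g i (by omega), cellB_eq g (i + 1) (by omega), cellB_eq g (i + 2) (by omega),
    cellB_eq g (i + 3) (by omega)]
  simp only [tuple4_XT]
  refine if_congr ?_ rfl rfl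
  push_cast
  ring_nf

theorem term_w4_st (g : List String) (i : ℕ) (hi : i + 3 < g.length) (j dj : Int) :
    (if (cellB (g.getD i "") j, cellB (g.getD (i + 1) "") (j + dj),
        cellB (g.getD (i + 2) "") (j + 2 * dj), cellB (g.getD (i + 3) "") (j + 3 * dj)) = STW
      then (1 : Int) else 0) = xmas1 g ((i : Int) + 3) (j + 3 * dj) (-1) (-dj) := by
  unfold xmas1
  rw [cellB_eq g i (by omega), cellB_eq g (i + 1) (by omega), cellB_eq g (i + 2) (by omega),
    cellB_eq g (i + 3) (by omega)]
  simp only [tuple4_ST]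
  refine if_congr ?_ rfl rfl
  push_cast
  ring_nf
  tauto

theorem window4_eq (g : List String) (i : ℕ) (hi : i + 3 < g.length) :
    window4_alt (g.getD i "") (g.getD (i + 1) "") (g.getD (i + 2) "") (g.getD (i + 3) "") =
      ∑ k ∈ Finset.range (lenZ g (i : Int)),
        (xmas1 g (i : Int) (k : Int) 1 (-1) + xmas1 g ((i : Int) + 3) ((k : Int) - 3) (-1) 1 +
          (xmas1 g (i : Int) (k : Int) 1 0 + xmas1 g ((i : Int) + 3) (k : Int) (-1) 0) +
          (xmas1 g (i : Int) (k : Int) 1 1 +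
            xmas1 g ((i : Int) + 3) ((k : Int) + 3) (-1) (-1))) := by
  unfold window4_alt
  rw [PySem.Str.len_eq]
  have hbody : (fun (n j : Int) =>
      ([-1, 0, 1] : List Int).foldl
        (fun n dj =>
          if (cellB (g.getD i "") j, cellB (g.getD (i + 1) "") (j + dj),
              cellB (g.getD (i + 2) "") (j + 2 * dj), cellB (g.getD (i + 3) "") (j + 3 * dj)) ∈
            [XTW, STW]
          then n + 1 else n) n) =
      fun n j => n +
        ((if (cellB (g.getD i "") j, cellB (g.getD (i + 1) "") (j + -1),
            cellB (g.getD (i + 2) "") (j + 2 * -1), cellB (g.getD (i + 3) "") (j + 3 * -1)) = XTW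
          then 1 else 0) +
         (if (cellB (g.getD i "") j, cellB (g.getD (i + 1) "") (j + -1),
            cellB (g.getD (i + 2) "") (j + 2 * -1), cellB (g.getD (i + 3) "") (j + 3 * -1)) = STW
          then 1 else 0) +
         ((if (cellB (g.getD i "") j, cellB (g.getD (i + 1) "") (j + 0),
            cellB (g.getD (i + 2) "") (j + 2 * 0), cellB (g.getD (i + 3) "") (j + 3 * 0)) = XTW
          then 1 else 0) +
          (if (cellB (g.getD i "") j, cellB (g.getD (i + 1) "") (j + 0),
            cellB (g.getD (i + 2) "") (j + 2 * 0), cellB (g.getD (i + 3) "") (j + 3 * 0)) = STW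
          then 1 else 0)) +
         ((if (cellB (g.getD i "") j, cellB (g.getD (i + 1) "") (j + 1),
            cellB (g.getD (i + 2) "") (j + 2 * 1), cellB (g.getD (i + 3) "") (j + 3 * 1)) = XTW
          then 1 else 0) +
          (if (cellB (g.getD i "") j, cellB (g.getD (i + 1) "") (j + 1),
            cellB (g.getD (i + 2) "") (j + 2 * 1), cellB (g.getD (i + 3) "") (j + 3 * 1)) = STW
          then 1 else 0))) := by
    funext n j
    simp only [List.foldl_cons, List.foldl_nil, ite_mem_two]
    ring
  rw [hbody, foldl_pyRange_add _ _ 0, zero_add, lenZ_nat]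
  refine Finset.sum_congr rfl fun k _ => ?_
  rw [term_w4_xt g i hi (k : Int) (-1), term_w4_st g i hi (k : Int) (-1),
    term_w4_xt g i hi (k : Int) 0, term_w4_st g i hi (k : Int) 0,
    term_w4_xt g i hi (k : Int) 1, term_w4_st g i hi (k : Int) 1]
  norm_num
  rw [show ((k : Int)) + -3 = (k : Int) - 3 from by ring]

theorem pair_MS (a b : Option Char) : ((a, b) ∈ MSW) ↔ (msPair a b = true) := by
  simp [MSW, msPair, Prod.ext_iff, List.mem_cons]

theorem window3_eq (g : List String) (i : ℕ) (hi : i + 2 < g.length) :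
    window3_alt (g.getD i "") (g.getD (i + 1) "") (g.getD (i + 2) "") =
      ∑ k ∈ Finset.range (lenZ g ((i : Int) + 1)), xInd g ((i : Int) + 1) (k : Int) := by
  unfold window3_alt
  rw [PySem.Str.len_eq]
  simp only [ite_add_one]
  rw [foldl_pyRange_add _ _ 0, zero_add]
  have hcast : ((i : Int) + 1) = ((i + 1 : ℕ) : Int) := by push_cast; ring
  rw [hcast, lenZ_nat]
  refine Finset.sum_congr rfl fun k hk => ?_
  have hk' := Finset.mem_range.mp hk
  have hb : PySem.Str.pyGet? (g.getD (i + 1) "") (k : Int) = cellAt g ((i + 1 : ℕ) : Int) (k : Int) := by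
    rw [cellAt_spec g (i + 1) (by omega), if_pos (Int.natCast_nonneg k), Int.toNat_natCast,
      PySem.Str.pyGet?_natCast]
  rw [hb]
  unfold xInd
  simp only [cellB_eq g i (by omega), cellB_eq g (i + 2) (by omega), pair_MS]
  refine if_congr ?_ rfl rfl
  push_cast
  ring_nf

theorem solve_alt_eq_sums (s : String) :
    solve_alt s =
      [∑ i ∈ Finset.range (PySem.Str.splitlines s).length,
          (count_row_alt ((PySem.Str.splitlines s).getD i "") +
            (if (i : Int) + 3 < ((PySem.Str.splitlines s).length : Int) then
              window4_alt ((PySem.Str.splitlines s).getD i "")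
                ((PySem.Str.splitlines s).getD (i + 1) "")
                ((PySem.Str.splitlines s).getD (i + 2) "")
                ((PySem.Str.splitlines s).getD (i + 3) "")
            else 0)),
        ∑ i ∈ Finset.range (PySem.Str.splitlines s).length,
          (if (i : Int) + 2 < ((PySem.Str.splitlines s).length : Int) then
            window3_alt ((PySem.Str.splitlines s).getD i "")
              ((PySem.Str.splitlines s).getD (i + 1) "")
              ((PySem.Str.splitlines s).getD (i + 2) "")
          else 0)] := by
  simp only [solve_alt]
  have hbody : (fun (t : Int × Int) (i : Int) =>
      ((if i + 3 < ((PySem.Str.splitlines s).length : Int) then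
          t.1 + count_row_alt (PySem.List.pyGetD (PySem.Str.splitlines s) i "") +
            window4_alt (PySem.List.pyGetD (PySem.Str.splitlines s) i "")
              (PySem.List.pyGetD (PySem.Str.splitlines s) (i + 1) "")
              (PySem.List.pyGetD (PySem.Str.splitlines s) (i + 2) "")
              (PySem.List.pyGetD (PySem.Str.splitlines s) (i + 3) "")
        else t.1 + count_row_alt (PySem.List.pyGetD (PySem.Str.splitlines s) i "")),
       (if i + 2 < ((PySem.Str.splitlines s).length : Int) then
          t.2 + window3_alt (PySem.List.pyGetD (PySem.Str.splitlines s) i "")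
            (PySem.List.pyGetD (PySem.Str.splitlines s) (i + 1) "")
            (PySem.List.pyGetD (PySem.Str.splitlines s) (i + 2) "")
        else t.2))) =
      fun t i =>
        (t.1 + (count_row_alt (PySem.List.pyGetD (PySem.Str.splitlines s) i "") +
          (if i + 3 < ((PySem.Str.splitlines s).length : Int) then
            window4_alt (PySem.List.pyGetD (PySem.Str.splitlines s) i "")
              (PySem.List.pyGetD (PySem.Str.splitlines s) (i + 1) "")
              (PySem.List.pyGetD (PySem.Str.splitlines s) (i + 2) "")
              (PySem.List.pyGetD (PySem.Str.splitlines s) (i + 3) "")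
          else 0)),
         t.2 + (if i + 2 < ((PySem.Str.splitlines s).length : Int) then
            window3_alt (PySem.List.pyGetD (PySem.Str.splitlines s) i "")
              (PySem.List.pyGetD (PySem.Str.splitlines s) (i + 1) "")
              (PySem.List.pyGetD (PySem.Str.splitlines s) (i + 2) "")
          else 0)) := by
    funext t p
    split_ifs <;> simp <;> ring
  rw [hbody, foldl_pyRange_pair (PySem.Str.splitlines s).length _ _ (0, 0)]
  simp only [zero_add, List.cons.injEq, and_true]
  constructor
  · refine Finset.sum_congr rfl fun k _ => ?_
    have e1 : ((k : Int) + 1) = ((k + 1 : ℕ) : Int) := by push_cast; ring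
    have e2 : ((k : Int) + 2) = ((k + 2 : ℕ) : Int) := by push_cast; ring
    have e3 : ((k : Int) + 3) = ((k + 3 : ℕ) : Int) := by push_cast; ring
    rw [e1, e2]
    rw [e3]
    simp only [PySem.List.pyGetD_natCast]
  · refine Finset.sum_congr rfl fun k _ => ?_
    have e1 : ((k : Int) + 1) = ((k + 1 : ℕ) : Int) := by push_cast; ring
    have e2 : ((k : Int) + 2) = ((k + 2 : ℕ) : Int) := by push_cast; ring
    rw [e1, e2]
    simp only [PySem.List.pyGetD_natCast]

-- ---------- assembly ----------

theorem dirSum_zero_col (g : List String) (i j : Int)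
    (h : j < 0 ∨ ((lenZ g i : Int)) ≤ j) : dirSum g i j = 0 := by
  unfold dirSum
  rw [xmas1_zero_anchor_col g i j (-1) (-1) h, xmas1_zero_anchor_col g i j (-1) 0 h,
    xmas1_zero_anchor_col g i j (-1) 1 h, xmas1_zero_anchor_col g i j 0 (-1) h,
    xmas1_zero_anchor_col g i j 0 1 h, xmas1_zero_anchor_col g i j 1 (-1) h,
    xmas1_zero_anchor_col g i j 1 0 h, xmas1_zero_anchor_col g i j 1 1 h]
  norm_num

theorem colshift1 (g : List String) (u di : Int) :
    (∑ j ∈ Finset.range (maxLen g + 3), xmas1 g u ((j : Int) + 3) di (-1)) =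
      ∑ j ∈ Finset.range (maxLen g + 3), xmas1 g u (j : Int) di (-1) := by
  have hs := sum_shift_add (fun z => xmas1 g u z di (-1)) (maxLen g + 3) 3
    (fun z hz1 hz2 => xmas1_zero_S_col g u z di (-1) (Or.inl (by omega)))
    (fun z hz => xmas1_zero_anchor_col g u z di (-1)
      (Or.inr (by have := lenZ_le_maxLen g u; push_cast at hz ⊢; omega)))
  norm_num at hs
  exact hs

theorem colshift2 (g : List String) (u di : Int) :
    (∑ j ∈ Finset.range (maxLen g + 3), xmas1 g u ((j : Int) - 3) di 1) =
      ∑ j ∈ Finset.range (maxLen g + 3), xmas1 g u (j : Int) di 1 := by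
  have hs := sum_shift_sub (fun z => xmas1 g u z di 1) (maxLen g + 3) 3
    (fun z hz => xmas1_zero_anchor_col g u z di 1 (Or.inl hz))
    (fun z hz => xmas1_zero_anchor_col g u z di 1
      (Or.inr (by have := lenZ_le_maxLen g u; push_cast at hz ⊢; omega)))
  norm_num at hs
  exact hs

theorem rowshift (g : List String) (b : Int) :
    (∑ i ∈ Finset.range g.length,
        ∑ j ∈ Finset.range (maxLen g + 3), xmas1 g ((i : Int) + 3) (j : Int) (-1) b) =
      ∑ i ∈ Finset.range g.length,
        ∑ j ∈ Finset.range (maxLen g + 3), xmas1 g (i : Int) (j : Int) (-1) b := by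
  have hs := sum_shift_add
    (fun u => ∑ j ∈ Finset.range (maxLen g + 3), xmas1 g u (j : Int) (-1) b) g.length 3
    (fun z hz1 hz2 => Finset.sum_eq_zero fun j _ =>
      xmas1_zero_S_row g z _ (-1) b (Or.inl (by omega)))
    (fun z hz => Finset.sum_eq_zero fun j _ =>
      xmas1_zero_anchor_row g z _ (-1) b (Or.inr hz))
  norm_num at hs
  exact hs

theorem part1_eq (g : List String) :
    (∑ i ∈ Finset.range g.length,
        ∑ j ∈ Finset.range (lenZ g (i : Int)), dirSum g (i : Int) (j : Int)) =
      ∑ i ∈ Finset.range g.length,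
        (count_row_alt (g.getD i "") +
          (if (i : Int) + 3 < (g.length : Int) then
            window4_alt (g.getD i "") (g.getD (i + 1) "") (g.getD (i + 2) "") (g.getD (i + 3) "")
          else 0)) := by
  have hL : ∀ i : ℕ, i < g.length →
      (∑ j ∈ Finset.range (lenZ g (i : Int)), dirSum g (i : Int) (j : Int)) =
        ∑ j ∈ Finset.range (maxLen g + 3), dirSum g (i : Int) (j : Int) := by
    intro i _
    exact sum_extend _ _ _ (le_trans (lenZ_le_maxLen g _) (by omega))
      (fun z hz => dirSum_zero_col g _ z (Or.inr hz))
  have hR : ∀ i : ℕ, i < g.length →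
      (count_row_alt (g.getD i "") +
        (if (i : Int) + 3 < (g.length : Int) then
          window4_alt (g.getD i "") (g.getD (i + 1) "") (g.getD (i + 2) "") (g.getD (i + 3) "")
        else 0)) =
        ∑ j ∈ Finset.range (maxLen g + 3),
          (xmas1 g (i : Int) (j : Int) 0 1 + xmas1 g (i : Int) ((j : Int) + 3) 0 (-1) +
            xmas1 g (i : Int) (j : Int) 1 (-1) +
            xmas1 g ((i : Int) + 3) ((j : Int) - 3) (-1) 1 +
            xmas1 g (i : Int) (j : Int) 1 0 + xmas1 g ((i : Int) + 3) (j : Int) (-1) 0 +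
            xmas1 g (i : Int) (j : Int) 1 1 +
            xmas1 g ((i : Int) + 3) ((j : Int) + 3) (-1) (-1)) := by
    intro i hi
    have hv1 : ∀ z : Int, ((lenZ g (i : Int) : Int)) ≤ z →
        (xmas1 g (i : Int) z 0 1 + xmas1 g (i : Int) (z + 3) 0 (-1)) = 0 := by
      intro z hz
      rw [xmas1_zero_anchor_col g _ z 0 1 (Or.inr hz),
        xmas1_zero_S_col g (i : Int) (z + 3) 0 (-1)
          (Or.inr (by rw [show ((i : Int) + 3 * 0) = (i : Int) from by ring]; omega))]
      norm_num
    have hc4 : ∀ z : Int, ((lenZ g (i : Int) : Int)) ≤ z →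
        xmas1 g ((i : Int) + 3) (z - 3) (-1) 1 = 0 := fun z hz =>
      xmas1_zero_S_col g _ _ (-1) 1
        (Or.inr (by rw [show ((i : Int) + 3 + 3 * (-1)) = (i : Int) from by ring]; omega))
    have hc6 : ∀ z : Int, ((lenZ g (i : Int) : Int)) ≤ z →
        xmas1 g ((i : Int) + 3) z (-1) 0 = 0 := fun z hz =>
      xmas1_zero_S_col g _ _ (-1) 0
        (Or.inr (by rw [show ((i : Int) + 3 + 3 * (-1)) = (i : Int) from by ring]; omega))
    have hc8 : ∀ z : Int, ((lenZ g (i : Int) : Int)) ≤ z →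
        xmas1 g ((i : Int) + 3) (z + 3) (-1) (-1) = 0 := fun z hz =>
      xmas1_zero_S_col g _ _ (-1) (-1)
        (Or.inr (by rw [show ((i : Int) + 3 + 3 * (-1)) = (i : Int) from by ring]; omega))
    by_cases hc : (i : Int) + 3 < (g.length : Int)
    · rw [if_pos hc, count_row_eq g i (by omega), window4_eq g i (by omega),
        sum_extend (fun z => xmas1 g (i : Int) z 0 1 + xmas1 g (i : Int) (z + 3) 0 (-1))
          (lenZ g (i : Int)) (maxLen g + 3) (le_trans (lenZ_le_maxLen g _) (by omega)) hv1,
        sum_extend (fun z => xmas1 g (i : Int) z 1 (-1) +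
            xmas1 g ((i : Int) + 3) (z - 3) (-1) 1 +
            (xmas1 g (i : Int) z 1 0 + xmas1 g ((i : Int) + 3) z (-1) 0) +
            (xmas1 g (i : Int) z 1 1 + xmas1 g ((i : Int) + 3) (z + 3) (-1) (-1)))
          (lenZ g (i : Int)) (maxLen g + 3) (le_trans (lenZ_le_maxLen g _) (by omega))
          (fun z hz => by
            dsimp only
            rw [xmas1_zero_anchor_col g _ z 1 (-1) (Or.inr hz),
              xmas1_zero_anchor_col g _ z 1 0 (Or.inr hz),
              xmas1_zero_anchor_col g _ z 1 1 (Or.inr hz), hc4 z hz, hc6 z hz, hc8 z hz]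
            norm_num),
        ← Finset.sum_add_distrib]
      exact Finset.sum_congr rfl fun j _ => by ring
    · have hrow3 : ∀ z dj : Int, xmas1 g (i : Int) z 1 dj = 0 := fun z dj =>
        xmas1_zero_S_row g _ z 1 dj
          (Or.inr (by rw [show ((i : Int) + 3 * 1) = (i : Int) + 3 from by ring]; omega))
      have hanc3 : ∀ z dj : Int, xmas1 g ((i : Int) + 3) z (-1) dj = 0 := fun z dj =>
        xmas1_zero_anchor_row g _ z (-1) dj (Or.inr (by omega))
      rw [if_neg hc, count_row_eq g i (by omega), add_zero,
        sum_extend (fun z => xmas1 g (i : Int) z 0 1 + xmas1 g (i : Int) (z + 3) 0 (-1))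
          (lenZ g (i : Int)) (maxLen g + 3) (le_trans (lenZ_le_maxLen g _) (by omega)) hv1]
      refine Finset.sum_congr rfl fun j _ => ?_
      rw [hrow3 (j : Int) (-1), hrow3 (j : Int) 0, hrow3 (j : Int) 1,
        hanc3 ((j : Int) - 3) 1, hanc3 (j : Int) 0, hanc3 ((j : Int) + 3) (-1)]
      ring
  rw [Finset.sum_congr rfl fun i hi => hL i (Finset.mem_range.mp hi),
    Finset.sum_congr rfl fun i hi => hR i (Finset.mem_range.mp hi)]
  simp only [dirSum, Finset.sum_add_distrib]
  have hB2 : (∑ i ∈ Finset.range g.length,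
      ∑ j ∈ Finset.range (maxLen g + 3), xmas1 g (i : Int) ((j : Int) + 3) 0 (-1)) =
      ∑ i ∈ Finset.range g.length,
        ∑ j ∈ Finset.range (maxLen g + 3), xmas1 g (i : Int) (j : Int) 0 (-1) :=
    Finset.sum_congr rfl fun i _ => colshift1 g (i : Int) 0
  have hB4 : (∑ i ∈ Finset.range g.length,
      ∑ j ∈ Finset.range (maxLen g + 3), xmas1 g ((i : Int) + 3) ((j : Int) - 3) (-1) 1) =
      ∑ i ∈ Finset.range g.length,
        ∑ j ∈ Finset.range (maxLen g + 3), xmas1 g (i : Int) (j : Int) (-1) 1 :=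
    (Finset.sum_congr rfl fun (i : ℕ) _ => colshift2 g ((i : Int) + 3) (-1)).trans (rowshift g 1)
  have hB6 : (∑ i ∈ Finset.range g.length,
      ∑ j ∈ Finset.range (maxLen g + 3), xmas1 g ((i : Int) + 3) (j : Int) (-1) 0) =
      ∑ i ∈ Finset.range g.length,
        ∑ j ∈ Finset.range (maxLen g + 3), xmas1 g (i : Int) (j : Int) (-1) 0 := rowshift g 0
  have hB8 : (∑ i ∈ Finset.range g.length,
      ∑ j ∈ Finset.range (maxLen g + 3), xmas1 g ((i : Int) + 3) ((j : Int) + 3) (-1) (-1)) =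
      ∑ i ∈ Finset.range g.length,
        ∑ j ∈ Finset.range (maxLen g + 3), xmas1 g (i : Int) (j : Int) (-1) (-1) :=
    (Finset.sum_congr rfl fun (i : ℕ) _ => colshift1 g ((i : Int) + 3) (-1)).trans (rowshift g (-1))
  rw [hB2, hB4, hB6, hB8]
  ring

theorem part2_eq (g : List String) :
    (∑ i ∈ Finset.range g.length,
        ∑ j ∈ Finset.range (lenZ g (i : Int)), xInd g (i : Int) (j : Int)) =
      ∑ i ∈ Finset.range g.length,
        (if (i : Int) + 2 < (g.length : Int) then
          window3_alt (g.getD i "") (g.getD (i + 1) "") (g.getD (i + 2) "")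
        else 0) := by
  have hL : ∀ i : ℕ, i < g.length →
      (∑ j ∈ Finset.range (lenZ g (i : Int)), xInd g (i : Int) (j : Int)) =
        ∑ j ∈ Finset.range (maxLen g + 3), xInd g (i : Int) (j : Int) := by
    intro i _
    exact sum_extend _ _ _ (le_trans (lenZ_le_maxLen g _) (by omega))
      (fun z hz => xInd_zero_anchor_col g _ z (Or.inr hz))
  have hR : ∀ i : ℕ, i < g.length →
      (if (i : Int) + 2 < (g.length : Int) then
          window3_alt (g.getD i "") (g.getD (i + 1) "") (g.getD (i + 2) "")
        else 0) =
        ∑ j ∈ Finset.range (maxLen g + 3), xInd g ((i : Int) + 1) (j : Int) := by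
    intro i _
    by_cases hc : (i : Int) + 2 < (g.length : Int)
    · rw [if_pos hc, window3_eq g i (by omega)]
      exact sum_extend _ _ _ (le_trans (lenZ_le_maxLen g _) (by omega))
        (fun z hz => xInd_zero_anchor_col g _ z (Or.inr hz))
    · rw [if_neg hc]
      refine (Finset.sum_eq_zero fun j _ => ?_).symm
      exact xInd_zero_down g _ _ (by omega)
  rw [Finset.sum_congr rfl fun i hi => hL i (Finset.mem_range.mp hi),
    Finset.sum_congr rfl fun i hi => hR i (Finset.mem_range.mp hi)]
  have hshift := sum_shift_add (fun u => ∑ j ∈ Finset.range (maxLen g + 3), xInd g u (j : Int))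
    g.length 1
    (fun z hz1 hz2 => Finset.sum_eq_zero fun j _ => xInd_zero_up g z _ (by omega))
    (fun z hz => Finset.sum_eq_zero fun j _ => xInd_zero_anchor_row g z _ (Or.inr hz))
  norm_num at hshift
  exact hshift.symm

-- ===== VERDICT (by name: the statement is the Claim_ definition above) =====
theorem solve_spec : Claim_equal_solve := by
  intro s _
  unfold Spec_solve
  rw [solve_eq_sums, solve_alt_eq_sums, part1_eq, part2_eq]
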